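-- pv_equiv track=rewrite | github.com/MaoucheMounir/Projet-MOGPL | Graphe.py | maxDifDeg
-- ===== SOURCE A (Python) =====
-- def getDegres (G): #retourne un tableau de tuple tel que chaque sommet et associé à son degré_pos= nombre d'arcs sortants degré_neg= nombre d'arcs entrants
--   degres = []
--
--   for sommet in G[1]: #parcourir tous les sommets de G
--     degre_pos=0
--     degre_neg=0
--     for arete in G[3]: #compter le nombre de fois ou chaque sommet apparait en tant qu'extrémité d'une arete
--       if sommet in arete :
--         if sommet == arete[0]:
--           degre_pos +=1
--         if sommet == arete[1]:
--           degre_neg +=1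
--
--     degres.append((sommet, degre_pos, degre_neg)) #créer un tuple pour représenté le degré de chaque sommet de G
--
--   return degres
--
-- def maxDifDeg(G):
--   degres = getDegres (G)
--   dmax = 0
--   smax = None
--
--   for d in degres:
--     diff_d = d[1] - d[2]
--     if diff_d >= dmax:
--       dmax = diff_d
--       smax = d[0]
--
--   return smax
-- ===== SOURCE B (Python) =====
-- def maxDifDeg(G):
--     # One pass over the edges accumulating out-minus-in per endpoint,
--     # then one scan over the vertices keeping the running maximum (>= 0).
--     diff = {}
--     for arete in G[3]:
--         u, v = arete[0], arete[1]
--         diff[u] = diff.get(u, 0) + 1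
--         diff[v] = diff.get(v, 0) - 1
--     dmax = 0
--     smax = None
--     for s in G[1]:
--         d = diff.get(s, 0)
--         if d >= dmax:
--             dmax = d
--             smax = s
--     return smax
-- ===== Notes on version B (the rewrite author's own statement) =====
-- stated objective: faster
-- what changed: Replaces the per-vertex rescan of the whole edge list with a single pass over edges accumulating each endpoint's out-minus-in difference in a dict, followed by one scan over the vertices.
import Mathlib
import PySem

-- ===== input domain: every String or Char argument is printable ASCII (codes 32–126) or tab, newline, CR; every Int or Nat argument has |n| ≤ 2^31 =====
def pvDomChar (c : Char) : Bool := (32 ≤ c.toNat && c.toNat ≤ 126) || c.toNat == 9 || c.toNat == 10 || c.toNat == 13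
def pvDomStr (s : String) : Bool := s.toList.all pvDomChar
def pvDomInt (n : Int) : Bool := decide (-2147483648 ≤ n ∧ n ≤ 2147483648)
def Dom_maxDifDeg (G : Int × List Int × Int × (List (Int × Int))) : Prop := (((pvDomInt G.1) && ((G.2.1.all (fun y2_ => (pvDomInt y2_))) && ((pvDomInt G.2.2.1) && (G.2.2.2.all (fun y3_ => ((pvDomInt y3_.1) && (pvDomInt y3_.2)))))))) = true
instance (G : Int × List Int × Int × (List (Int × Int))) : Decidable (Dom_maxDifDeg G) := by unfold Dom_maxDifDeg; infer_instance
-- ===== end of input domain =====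

set_option maxRecDepth 4096


-- B replaces A's per-vertex rescan of the edge list by one pass over the edges
-- accumulating out-minus-in per endpoint in a dict, then one scan over the vertices (faster).

-- ===== PORT A =====
def getDegres (G : Int × List Int × Int × (List (Int × Int))) : List (Int × Int × Int) :=
  G.2.1.foldl (fun degres sommet =>
    let dd := G.2.2.2.foldl (fun (p : Int × Int) arete =>
      if sommet = arete.1 ∨ sommet = arete.2 then
        let p1 := if sommet = arete.1 then (p.1 + 1, p.2) else p
        if sommet = arete.2 then (p1.1, p1.2 + 1) else p1
      else p) ((0 : Int), (0 : Int))
    degres ++ [(sommet, dd.1, dd.2)]) []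

def maxDifDeg (G : Int × List Int × Int × (List (Int × Int))) : Option Int :=
  let degres := getDegres G
  (degres.foldl (fun (st : Int × Option Int) d =>
    let diff_d := d.2.1 - d.2.2
    if diff_d ≥ st.1 then (diff_d, some d.1) else st) ((0 : Int), (none : Option Int))).2

-- ===== PORT B =====
def maxDifDeg_alt (G : Int × List Int × Int × (List (Int × Int))) : Option Int :=
  let diff := G.2.2.2.foldl (fun (d : PySem.Dict Int Int) arete =>
    let d1 := d.insert arete.1 (d.getD arete.1 0 + 1)
    d1.insert arete.2 (d1.getD arete.2 0 - 1)) PySem.Dict.empty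
  (G.2.1.foldl (fun (st : Int × Option Int) s =>
    let d := diff.getD s 0
    if d ≥ st.1 then (d, some s) else st) ((0 : Int), (none : Option Int))).2

-- ===== PRECONDITION & SPEC =====
def Spec_maxDifDeg (G : Int × List Int × Int × (List (Int × Int))) (out : Option Int) : Prop := out = maxDifDeg_alt G
instance (G : Int × List Int × Int × (List (Int × Int))) (out : Option Int) : Decidable (Spec_maxDifDeg G out) := by unfold Spec_maxDifDeg; infer_instance

-- ===== CLAIM (what is proved, stated in full; the proofs are below) =====
def Claim_equal_maxDifDeg : Prop := ∀ (G : Int × List Int × Int × (List (Int × Int))), Dom_maxDifDeg G → Spec_maxDifDeg G (maxDifDeg G)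

-- ===== LEMMAS AND PROOFS =====

-- A's inner loop over the edges counts occurrences of `s` as first resp. second endpoint.
theorem innerA_eq (s : Int) (es : List (Int × Int)) (p : Int × Int) :
    es.foldl (fun (p : Int × Int) arete =>
      if s = arete.1 ∨ s = arete.2 then
        let p1 := if s = arete.1 then (p.1 + 1, p.2) else p
        if s = arete.2 then (p1.1, p1.2 + 1) else p1
      else p) p
    = (p.1 + ((es.map Prod.fst).count s : Int), p.2 + ((es.map Prod.snd).count s : Int)) := by
  induction es generalizing p with
  | nil => simp
  | cons e t ih =>
    obtain ⟨u, v⟩ := e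
    simp only [List.foldl_cons, ih, List.map_cons, List.count_cons, beq_iff_eq]
    clear ih
    split_ifs <;> rw [Prod.ext_iff] <;> dsimp only <;> constructor <;> push_cast <;> omega

-- B's dict loop accumulates, for each key, (#times as first endpoint) - (#times as second).
theorem dictB_eq (es : List (Int × Int)) (d : PySem.Dict Int Int) (x : Int) :
    (es.foldl (fun (d : PySem.Dict Int Int) arete =>
      let d1 := d.insert arete.1 (d.getD arete.1 0 + 1)
      d1.insert arete.2 (d1.getD arete.2 0 - 1)) d).getD x 0
    = d.getD x 0 + ((es.map Prod.fst).count x : Int) - ((es.map Prod.snd).count x : Int) := by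
  induction es generalizing d with
  | nil => simp
  | cons e t ih =>
    obtain ⟨u, v⟩ := e
    rw [List.foldl_cons, ih]
    clear ih
    simp only [List.map_cons, List.count_cons, beq_iff_eq, PySem.Dict.getD_insert]
    split_ifs <;> subst_vars <;> push_cast <;> omega

-- A's outer append loop builds the map of the vertex list.
theorem getDegres_eq (vs : List Int) (g : Int → Int × Int × Int) (acc : List (Int × Int × Int)) :
    vs.foldl (fun degres sommet => degres ++ [g sommet]) acc
    = acc ++ vs.map g := by
  induction vs generalizing acc with
  | nil => simp
  | cons v t ih => simp [ih]

-- ===== VERDICT (by name: the statement is the Claim_ definition above) =====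
theorem maxDifDeg_spec : Claim_equal_maxDifDeg := by
  intro G _
  unfold Spec_maxDifDeg maxDifDeg maxDifDeg_alt getDegres
  obtain ⟨n, vs, m, es⟩ := G
  simp only
  simp only [innerA_eq]
  rw [getDegres_eq vs
    (fun s => (s, (0 : Int) + ((es.map Prod.fst).count s : Int),
                  (0 : Int) + ((es.map Prod.snd).count s : Int))) []]
  simp only [List.nil_append, List.foldl_map, zero_add]
  congr 1
  apply PySem.List.foldl_congr_mem
  intro st s _
  rw [dictB_eq]
  simp
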